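-- pv_equiv track=rewrite | github.com/Ralf-Kemmann/Quantum-Spacetime-Bridge | scripts/run_bmc14_null_model_feature_control.py | graph_components
-- ===== SOURCE A (Python) =====
-- from collections import defaultdict, deque
-- from typing import Any, Dict, List, Sequence, Set, Tuple
--
-- def graph_components(rows: Sequence[Dict[str, Any]]) -> Tuple[int, int, int]:
--     nodes = sorted({str(r["source"]) for r in rows} | {str(r["target"]) for r in rows})
--     if not nodes:
--         return 0, 0, 0
--     adj: Dict[str, Set[str]] = {n: set() for n in nodes}
--     for row in rows:
--         a, b = str(row["source"]), str(row["target"])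
--         adj.setdefault(a, set()).add(b)
--         adj.setdefault(b, set()).add(a)
--
--     seen: Set[str] = set()
--     sizes: List[int] = []
--     for start in nodes:
--         if start in seen:
--             continue
--         q = deque([start])
--         seen.add(start)
--         size = 0
--         while q:
--             cur = q.popleft()
--             size += 1
--             for nxt in adj.get(cur, set()):
--                 if nxt not in seen:
--                     seen.add(nxt)
--                     q.append(nxt)
--         sizes.append(size)
--     return len(nodes), len(sizes), max(sizes) if sizes else 0
-- ===== SOURCE B (Python) =====
-- def graph_components(rows):
--     # one pass builds the adjacency (and hence the node set); components are
--     # grown by whole-frontier set saturation instead of a node-at-a-time queue,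
--     # with a running count and running max instead of a list of sizes.
--     adj = {}
--     for row in rows:
--         a, b = str(row["source"]), str(row["target"])
--         adj.setdefault(a, set()).add(b)
--         adj.setdefault(b, set()).add(a)
--     nodes = sorted(adj)
--     remaining = set(nodes)
--     count = 0
--     largest = 0
--     for start in nodes:
--         if start not in remaining:
--             continue
--         remaining.discard(start)
--         comp = {start}
--         frontier = {start}
--         while frontier:
--             frontier = {y for x in frontier for y in adj[x]} & remaining
--             remaining -= frontier
--             comp |= frontier
--         count += 1
--         largest = max(largest, len(comp))
--     return len(nodes), count, largest
-- ===== Notes on version B (the rewrite author's own statement) =====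
-- stated objective: alternative
-- what changed: Replaces A's per-node FIFO-queue BFS with a whole-frontier set-saturation expansion, builds the adjacency dict (and thus the node set) in a single pass instead of a separate node-set pass plus pre-seeded adjacency, and keeps a running component count and running maximum instead of accumulating a list of sizes and taking len/max at the end.
import Mathlib
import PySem

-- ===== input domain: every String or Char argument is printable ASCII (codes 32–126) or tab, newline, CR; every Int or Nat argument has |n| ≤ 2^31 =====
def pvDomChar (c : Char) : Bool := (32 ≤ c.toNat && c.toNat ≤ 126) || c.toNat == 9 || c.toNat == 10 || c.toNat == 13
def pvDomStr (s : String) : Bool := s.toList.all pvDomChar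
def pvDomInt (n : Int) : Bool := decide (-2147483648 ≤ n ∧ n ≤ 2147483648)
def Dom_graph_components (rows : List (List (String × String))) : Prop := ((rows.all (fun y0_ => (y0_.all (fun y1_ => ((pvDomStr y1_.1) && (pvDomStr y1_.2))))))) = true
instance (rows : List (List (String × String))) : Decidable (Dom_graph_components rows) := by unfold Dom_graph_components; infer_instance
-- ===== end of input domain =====

-- B replaces A's per-node BFS queue by whole-frontier set saturation with a running
-- component count and running maximum, building the adjacency (and node set) in one pass;
-- same return value, similar cost ("alternative", no speed claim).
-- In both ports the Python `seen` set is represented by its complement `rem` (the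
-- not-yet-seen nodes): `x in seen` becomes `x ∉ rem`, `seen.add x` removes x from rem.
-- This is exact because every traversed node lies in the fixed node list.

-- ===== PORT A =====
-- `r["k"]` for a row dict (total via a default; exact under Pre_, which demands the key).
def pvGetKey (r : List (String × String)) (k : String) : String :=
  (PySem.Dict.mk r).getD k ""

-- `adj.setdefault(a, set()).add(b); adj.setdefault(b, set()).add(a)` (identical lines in A and B).
def pvAddEdge (d : PySem.Dict String (List String)) (a b : String) :
    PySem.Dict String (List String) :=
  let d1 := d.insert a (PySem.Set.add (d.getD a []) b)
  d1.insert b (PySem.Set.add (d1.getD b []) a)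

-- A's inner `for nxt in adj.get(cur, set()): if nxt not in seen: seen.add(nxt); q.append(nxt)`.
def pvInner (rem qt : List String) (ns : List String) : List String × List String :=
  ns.foldl (fun p nxt => if p.1.contains nxt then (p.1.erase nxt, p.2 ++ [nxt]) else p) (rem, qt)

-- needed by pvBFS's decreasing_by
lemma pvInner_cons (rem qt : List String) (x : String) (t : List String) :
    pvInner rem qt (x :: t) =
      if x ∈ rem then pvInner (rem.erase x) (qt ++ [x]) t else pvInner rem qt t := by
  simp only [pvInner, List.foldl_cons]
  by_cases hx : x ∈ rem <;> simp [hx]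

lemma pvInner_length_cases : ∀ (ns rem qt : List String),
    (pvInner rem qt ns).1.length < rem.length ∨ pvInner rem qt ns = (rem, qt) := by
  intro ns
  induction ns with
  | nil => intro rem qt; right; rfl
  | cons x t ih =>
      intro rem qt
      rw [pvInner_cons]
      by_cases hmem : x ∈ rem
      · simp only [hmem, if_true]
        have h1 : (rem.erase x).length < rem.length := by
          rw [List.length_erase_of_mem hmem]
          have : rem ≠ [] := by rintro rfl; simp at hmem
          have : rem.length ≠ 0 := by simpa [List.length_eq_zero_iff]
          omega
        rcases ih (rem.erase x) (qt ++ [x]) with h | h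
        · left; exact lt_trans h h1
        · left; rw [h]; exact h1
      · simp only [hmem, if_false]
        exact ih rem qt

-- A's `while q:` BFS loop; `size` counts pops.
def pvBFS (adj : PySem.Dict String (List String)) (rem q : List String) (size : Int) :
    List String × Int :=
  match q with
  | [] => (rem, size)
  | cur :: qt =>
      let st := pvInner rem qt (adj.getD cur [])
      pvBFS adj st.1 st.2 (size + 1)
  termination_by (rem.length, q.length)
  decreasing_by
    rcases pvInner_length_cases (adj.getD cur []) rem qt with h | h
    · exact Prod.Lex.left _ _ h
    · rw [h]; exact Prod.Lex.right _ (by simp)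

def graph_components (rows : List (List (String × String))) : Int × Int × Int :=
  let nodes := PySem.List.sorted
    (PySem.Set.union (PySem.Set.ofList (rows.map (fun r => pvGetKey r "source")))
      (PySem.Set.ofList (rows.map (fun r => pvGetKey r "target")))) (fun x => x) false
  if nodes = [] then (0, 0, 0)
  else
    let adj := rows.foldl (fun d r => pvAddEdge d (pvGetKey r "source") (pvGetKey r "target"))
      (nodes.foldl (fun d n => d.insert n []) PySem.Dict.empty)
    let fin := nodes.foldl (fun (st : List String × List Int) start =>
        if st.1.contains start then
          let r := pvBFS adj (st.1.erase start) [start] 0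
          (r.1, st.2 ++ [r.2])
        else st) (nodes, ([] : List Int))
    ((nodes.length : Int), (fin.2.length : Int),
      match PySem.List.max? fin.2 (fun x => x) with
      | some m => m
      | none => 0)

-- ===== PORT B =====
-- `{y for x in frontier for y in adj[x]} & remaining`  (adj[x] never misses: frontier ⊆ keys).
def pvFrontier (adj : PySem.Dict String (List String)) (f rem : List String) : List String :=
  PySem.Set.inter (PySem.Set.ofList (f.flatMap (fun x => adj.getD x []))) rem

-- B's `while frontier:` saturation loop; comp accumulates the component.
def pvSat (adj : PySem.Dict String (List String)) (rem f comp : List String) :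
    List String × List String :=
  let nf := pvFrontier adj f rem
  if h : nf.isEmpty then (rem, comp)
  else pvSat adj (PySem.Set.diff rem nf) nf (PySem.Set.union comp nf)
  termination_by rem.length
  decreasing_by
    have hne : nf ≠ [] := by simpa [List.isEmpty_iff] using h
    have hx : nf.head hne ∈ rem := by
      have hmem : nf.head hne ∈ pvFrontier adj f rem := List.head_mem hne
      unfold pvFrontier at hmem
      exact ((PySem.Set.mem_inter _ _ _).mp hmem).2
    show (PySem.Set.diff rem nf).length < rem.length
    have : PySem.Set.diff rem nf = rem.filter (fun x => !(nf.contains x)) := rfl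
    rw [this]
    refine List.length_filter_lt_length_iff_exists.mpr ?_
    exact ⟨nf.head hne, hx, by simp [List.head_mem hne]⟩

def graph_components_alt (rows : List (List (String × String))) : Int × Int × Int :=
  let adj := rows.foldl (fun d r => pvAddEdge d (pvGetKey r "source") (pvGetKey r "target"))
    PySem.Dict.empty
  let nodes := PySem.List.sorted adj.keys (fun x => x) false
  let fin := nodes.foldl (fun (st : List String × Int × Int) start =>
      if st.1.contains start then
        let r := pvSat adj (PySem.Set.discard st.1 start) [start] [start]
        (r.1, st.2.1 + 1, max st.2.2 (r.2.length : Int))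
      else st) (nodes, (0 : Int), (0 : Int))
  ((nodes.length : Int), fin.2.1, fin.2.2)

-- ===== PRECONDITION & SPEC =====
-- Pre_ excludes exactly the rows lacking a "source" or "target" key, on which the Python A
-- (and B alike) raises KeyError.
def Pre_graph_components (rows : List (List (String × String))) : Prop :=
  ∀ r ∈ rows, ((PySem.Dict.mk r).get? "source").isSome = true ∧
    ((PySem.Dict.mk r).get? "target").isSome = true
instance (rows : List (List (String × String))) : Decidable (Pre_graph_components rows) := by
  unfold Pre_graph_components; infer_instance

def pvWitness_graph_components : (List (List (String × String))) :=
  [[("source", "a"), ("target", "b")], [("source", "b"), ("target", "c")]]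

def Spec_graph_components (rows : List (List (String × String))) (out : Int × Int × Int) : Prop :=
  out = graph_components_alt rows
instance (rows : List (List (String × String))) (out : Int × Int × Int) :
    Decidable (Spec_graph_components rows out) := by unfold Spec_graph_components; infer_instance

-- ===== CLAIM (what is proved, stated in full; the proofs are below) =====
def Claim_equal_graph_components : Prop := ∀ (rows : List (List (String × String))),
  Dom_graph_components rows → Pre_graph_components rows →
  Spec_graph_components rows (graph_components rows)

-- ===== LEMMAS AND PROOFS =====

-- reachability from the frontier q through edges whose target is still in rem
inductive pvReach (adj : PySem.Dict String (List String)) (rem q : List String) : String → Prop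
  | base {x} (hx : x ∈ q) : pvReach adj rem q x
  | step {y x} (hy : pvReach adj rem q y) (hadj : x ∈ adj.getD y []) (hx : x ∈ rem) :
      pvReach adj rem q x

lemma pvReach_nil {adj rem x} : ¬ pvReach adj rem [] x := by
  intro h; induction h with
  | base hx => simp at hx
  | step _ _ _ ih => exact ih

lemma pvReach_congr {adjA adjB : PySem.Dict String (List String)}
    (hEq : ∀ y, adjA.getD y [] = adjB.getD y []) {rem q x} :
    pvReach adjA rem q x ↔ pvReach adjB rem q x := by
  constructor <;> intro h
  · induction h with
    | base hx => exact pvReach.base hx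
    | step _ hadj hx ih => exact pvReach.step ih (by rwa [← hEq]) hx
  · induction h with
    | base hx => exact pvReach.base hx
    | step _ hadj hx ih => exact pvReach.step ih (by rwa [hEq]) hx

lemma pvInner_closed (ns : List String) : ∀ (rem qt : List String), rem.Nodup → ns.Nodup →
    pvInner rem qt ns =
      (rem.filter (fun x => !(ns.contains x)), qt ++ ns.filter (fun x => rem.contains x)) := by
  induction ns with
  | nil => intro rem qt _ _; simp [pvInner]
  | cons x t ih =>
      intro rem qt hrem hns
      obtain ⟨hxt, hndt⟩ := List.nodup_cons.mp hns
      rw [pvInner_cons]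
      by_cases hx : x ∈ rem
      · simp only [hx, if_true]
        rw [ih (rem.erase x) (qt ++ [x]) (hrem.erase x) hndt]
        refine Prod.ext ?_ ?_
        · show (rem.erase x).filter _ = rem.filter _
          rw [hrem.erase_eq_filter x, List.filter_filter]
          refine List.filter_congr ?_
          intro y hy
          by_cases hxy : y = x <;> simp [hxy]
        · show (qt ++ [x]) ++ _ = qt ++ _
          rw [List.append_assoc]
          congr 1
          have ht : t.filter (fun y => (rem.erase x).contains y)
              = t.filter (fun y => rem.contains y) := by
            refine List.filter_congr ?_
            intro y hy
            have hne : y ≠ x := fun h => hxt (h ▸ hy)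
            simp [List.mem_erase_of_ne hne]
          rw [ht]
          simp [hx]
      · simp only [hx, if_false]
        rw [ih rem qt hrem hndt]
        refine Prod.ext ?_ ?_
        · show rem.filter _ = rem.filter _
          refine List.filter_congr ?_
          intro y hy
          have hne : y ≠ x := fun h => hx (h ▸ hy)
          simp [hne]
        · show qt ++ _ = qt ++ _
          congr 1
          simp [hx]

lemma pv_sub_eq_filter : ∀ {l r : List String}, l.Sublist r → r.Nodup →
    l = r.filter (fun x => decide (x ∈ l)) := by
  intro l r h
  induction h with
  | slnil => intro _; rfl
  | @cons l r a h ih =>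
      intro hr
      obtain ⟨har, hrnd⟩ := List.nodup_cons.mp hr
      have hal : a ∉ l := fun hmem => har (h.subset hmem)
      rw [List.filter_cons]
      have h1 : (decide (a ∈ l)) = false := by simpa using hal
      rw [h1]
      simpa using ih hrnd
  | @cons₂ l r a h ih =>
      intro hr
      obtain ⟨har, hrnd⟩ := List.nodup_cons.mp hr
      rw [List.filter_cons, if_pos (by simp : (decide (a ∈ a :: l)) = true)]
      congr 1
      have heq : r.filter (fun x => decide (x ∈ a :: l)) = r.filter (fun x => decide (x ∈ l)) := by
        refine List.filter_congr ?_
        intro y hy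
        have hne : y ≠ a := fun hEq => har (hEq ▸ hy)
        simp [List.mem_cons, hne]
      rw [heq, ← ih hrnd]

lemma pv_sublist_eq_of_mem_iff {l₁ l₂ r : List String} (h1 : l₁.Sublist r) (h2 : l₂.Sublist r)
    (hr : r.Nodup) (hm : ∀ x, x ∈ l₁ ↔ x ∈ l₂) : l₁ = l₂ := by
  rw [pv_sub_eq_filter h1 hr, pv_sub_eq_filter h2 hr]
  refine List.filter_congr ?_
  intro y _
  simp [hm y]

lemma pv_length_filter_not_mem (rem ns : List String) (hrem : rem.Nodup) (hns : ns.Nodup)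
    (hsub : ∀ x ∈ ns, x ∈ rem) :
    (rem.filter (fun x => !(ns.contains x))).length = rem.length - ns.length := by
  have hgen : ∀ (l : List String) (p : String → Bool),
      (l.filter p).length + (l.filter (fun x => !(p x))).length = l.length := by
    intro l p
    induction l with
    | nil => simp
    | cons a t ih => by_cases h : p a <;> simp [h] <;> omega
  have hsplit := hgen rem (fun x => ns.contains x)
  have hperm : (rem.filter (fun x => ns.contains x)).Perm ns := by
    refine (List.perm_ext_iff_of_nodup (hrem.filter _) hns).mpr ?_
    intro a
    simp only [List.mem_filter]
    constructor
    · rintro ⟨_, ha⟩; simpa using ha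
    · intro ha; exact ⟨hsub a ha, by simpa using ha⟩
  have := hperm.length_eq
  omega

-- frontier-shift for A's BFS step
lemma pvReach_shiftA (adj : PySem.Dict String (List String)) (rem qt : List String) (cur : String)
    (ns rem' : List String) (hcur : cur ∉ rem) (hqt : ∀ y ∈ qt, y ∉ rem)
    (hnsmem : ∀ y, y ∈ ns ↔ y ∈ adj.getD cur [] ∧ y ∈ rem)
    (hrem'mem : ∀ y, y ∈ rem' ↔ y ∈ rem ∧ y ∉ ns) :
    ∀ x ∈ rem, pvReach adj rem (cur :: qt) x ↔ (x ∈ ns ∨ pvReach adj rem' (qt ++ ns) x) := by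
  have back : ∀ y, pvReach adj rem' (qt ++ ns) y → pvReach adj rem (cur :: qt) y := by
    intro y hy
    induction hy with
    | base hx =>
        rcases List.mem_append.mp hx with h | h
        · exact pvReach.base (List.mem_cons_of_mem _ h)
        · exact pvReach.step (pvReach.base List.mem_cons_self) ((hnsmem _).mp h).1 ((hnsmem _).mp h).2
    | step _ hadj hx ih => exact pvReach.step ih hadj ((hrem'mem _).mp hx).1
  have fwd : ∀ y, pvReach adj rem (cur :: qt) y →
      y = cur ∨ y ∈ qt ∨ y ∈ ns ∨ pvReach adj rem' (qt ++ ns) y := by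
    intro y hy
    induction hy with
    | base hx => rcases List.mem_cons.mp hx with h | h
                 · exact Or.inl h
                 · exact Or.inr (Or.inl h)
    | @step z y hz hadj hx ih =>
        by_cases hyns : y ∈ ns
        · exact Or.inr (Or.inr (Or.inl hyns))
        · have hyrem' : y ∈ rem' := (hrem'mem _).mpr ⟨hx, hyns⟩
          rcases ih with h | h | h | h
          · exact Or.inr (Or.inr (Or.inl ((hnsmem _).mpr ⟨h ▸ hadj, hx⟩)))
          · exact Or.inr (Or.inr (Or.inr
              (pvReach.step (pvReach.base (List.mem_append.mpr (Or.inl h))) hadj hyrem')))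
          · exact Or.inr (Or.inr (Or.inr
              (pvReach.step (pvReach.base (List.mem_append.mpr (Or.inr h))) hadj hyrem')))
          · exact Or.inr (Or.inr (Or.inr (pvReach.step h hadj hyrem')))
  intro x hx
  constructor
  · intro h
    rcases fwd x h with h | h | h | h
    · exact absurd (h ▸ hx) hcur
    · exact absurd hx (hqt x h)
    · exact Or.inl h
    · exact Or.inr h
  · rintro (h | h)
    · exact pvReach.step (pvReach.base List.mem_cons_self) ((hnsmem _).mp h).1 ((hnsmem _).mp h).2
    · exact back x h

-- frontier-shift for B's saturation step
lemma pvReach_shiftB (adj : PySem.Dict String (List String)) (rem f : List String)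
    (ns rem' : List String) (hf : ∀ y ∈ f, y ∉ rem)
    (hnsmem : ∀ y, y ∈ ns ↔ (∃ z ∈ f, y ∈ adj.getD z []) ∧ y ∈ rem)
    (hrem'mem : ∀ y, y ∈ rem' ↔ y ∈ rem ∧ y ∉ ns) :
    ∀ x ∈ rem, pvReach adj rem f x ↔ (x ∈ ns ∨ pvReach adj rem' ns x) := by
  have back : ∀ y, pvReach adj rem' ns y → pvReach adj rem f y := by
    intro y hy
    induction hy with
    | base hx =>
        obtain ⟨⟨z, hz, hadj⟩, hyrem⟩ := (hnsmem _).mp hx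
        exact pvReach.step (pvReach.base hz) hadj hyrem
    | step _ hadj hx ih => exact pvReach.step ih hadj ((hrem'mem _).mp hx).1
  have fwd : ∀ y, pvReach adj rem f y → y ∈ f ∨ y ∈ ns ∨ pvReach adj rem' ns y := by
    intro y hy
    induction hy with
    | base hx => exact Or.inl hx
    | @step z y hz hadj hx ih =>
        by_cases hyns : y ∈ ns
        · exact Or.inr (Or.inl hyns)
        · have hyrem' : y ∈ rem' := (hrem'mem _).mpr ⟨hx, hyns⟩
          rcases ih with h | h | h
          · exact Or.inr (Or.inl ((hnsmem _).mpr ⟨⟨z, h, hadj⟩, hx⟩))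
          · exact Or.inr (Or.inr (pvReach.step (pvReach.base h) hadj hyrem'))
          · exact Or.inr (Or.inr (pvReach.step h hadj hyrem'))
  intro x hx
  constructor
  · intro h
    rcases fwd x h with h | h | h
    · exact absurd hx (hf x h)
    · exact Or.inl h
    · exact Or.inr h
  · rintro (h | h)
    · exact back x (pvReach.base h)
    · exact back x h

-- when the frontier has no neighbours left in rem, nothing outside f is reachable
lemma pvReach_stuck (adj : PySem.Dict String (List String)) (rem f : List String)
    (h0 : ∀ y, ¬((∃ z ∈ f, y ∈ adj.getD z []) ∧ y ∈ rem)) :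
    ∀ y, pvReach adj rem f y → y ∈ f := by
  intro y hy
  induction hy with
  | base hx => exact hx
  | @step z y hz hadj hx ih => exact absurd ⟨⟨z, ih, hadj⟩, hx⟩ (h0 y)

lemma pvBFS_char (adj : PySem.Dict String (List String))
    (hvals : ∀ y, (adj.getD y []).Nodup) :
    ∀ (rem q : List String) (size : Int), rem.Nodup → (∀ x ∈ q, x ∉ rem) →
      ((∀ x, x ∈ (pvBFS adj rem q size).1 ↔ x ∈ rem ∧ ¬ pvReach adj rem q x)
        ∧ (pvBFS adj rem q size).1.Sublist rem
        ∧ (pvBFS adj rem q size).2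
            = size + (q.length : Int) + ((rem.length : Int) - ((pvBFS adj rem q size).1.length : Int))) := by
  refine pvBFS.induct adj (motive := fun rem q size => rem.Nodup → (∀ x ∈ q, x ∉ rem) →
      ((∀ x, x ∈ (pvBFS adj rem q size).1 ↔ x ∈ rem ∧ ¬ pvReach adj rem q x)
        ∧ (pvBFS adj rem q size).1.Sublist rem
        ∧ (pvBFS adj rem q size).2
            = size + (q.length : Int) + ((rem.length : Int) - ((pvBFS adj rem q size).1.length : Int))))
    ?_ ?_
  · intro rem size hrem _
    have hbfs : pvBFS adj rem [] size = (rem, size) := by rw [pvBFS]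
    rw [hbfs]
    refine ⟨?_, List.Sublist.refl rem, by simp⟩
    intro x
    simp only [iff_self_and]
    exact fun _ => pvReach_nil
  · intro rem size cur qt st ih hrem hq
    have hcur : cur ∉ rem := hq cur List.mem_cons_self
    have hqt : ∀ y ∈ qt, y ∉ rem := fun y hy => hq y (List.mem_cons_of_mem _ hy)
    have hns0 : (adj.getD cur []).Nodup := hvals cur
    have hclosed := pvInner_closed (adj.getD cur []) rem qt hrem hns0
    set ns := (adj.getD cur []).filter (fun x => rem.contains x) with hnsdef
    have hfeq : rem.filter (fun x => !((adj.getD cur []).contains x))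
        = rem.filter (fun x => !(ns.contains x)) := by
      refine List.filter_congr ?_
      intro y hy
      by_cases h : y ∈ adj.getD cur [] <;> simp [hnsdef, h, hy]
    set rem' := rem.filter (fun x => !(ns.contains x)) with hrem'def
    have hclosed' : pvInner rem qt (adj.getD cur []) = (rem', qt ++ ns) := by
      rw [hclosed, hfeq]
    have hst : st = (rem', qt ++ ns) := hclosed'
    rw [hst] at ih
    dsimp only at ih
    have hbfs : pvBFS adj rem (cur :: qt) size = pvBFS adj rem' (qt ++ ns) (size + 1) := by
      rw [pvBFS, hclosed']
    have hnsmem : ∀ y, y ∈ ns ↔ y ∈ adj.getD cur [] ∧ y ∈ rem := by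
      intro y; simp [hnsdef]
    have hrem'mem : ∀ y, y ∈ rem' ↔ y ∈ rem ∧ y ∉ ns := by
      intro y
      constructor
      · intro hy
        have := List.mem_filter.mp hy
        exact ⟨this.1, by simpa using this.2⟩
      · rintro ⟨h1, h2⟩
        exact List.mem_filter.mpr ⟨h1, by simpa using h2⟩
    have hrem' : rem'.Nodup := hrem.filter _
    have hdisj : ∀ x ∈ qt ++ ns, x ∉ rem' := by
      intro x hx hx'
      rcases List.mem_append.mp hx with h | h
      · exact hqt x h ((hrem'mem x).mp hx').1
      · exact ((hrem'mem x).mp hx').2 h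
    obtain ⟨ihm, ihs, ihsz⟩ := ih hrem' hdisj
    have hshift := pvReach_shiftA adj rem qt cur ns rem' hcur hqt hnsmem hrem'mem
    have hnssub : ∀ x ∈ ns, x ∈ rem := fun x hx => ((hnsmem x).mp hx).2
    have hnsnd : ns.Nodup := hns0.filter _
    have hmem : ∀ x, x ∈ (pvBFS adj rem (cur :: qt) size).1
        ↔ x ∈ rem ∧ ¬ pvReach adj rem (cur :: qt) x := by
      intro x
      rw [hbfs]
      constructor
      · intro hx
        obtain ⟨hx1, hx2⟩ := (ihm x).mp hx
        have hxrem : x ∈ rem := ((hrem'mem x).mp hx1).1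
        refine ⟨hxrem, ?_⟩
        intro hr
        rcases (hshift x hxrem).mp hr with h | h
        · exact ((hrem'mem x).mp hx1).2 h
        · exact hx2 h
      · rintro ⟨hxrem, hnr⟩
        have hxns : x ∉ ns := fun h => hnr ((hshift x hxrem).mpr (Or.inl h))
        have hxrem' : x ∈ rem' := (hrem'mem x).mpr ⟨hxrem, hxns⟩
        refine (ihm x).mpr ⟨hxrem', ?_⟩
        intro h
        exact hnr ((hshift x hxrem).mpr (Or.inr h))
    have hsub : (pvBFS adj rem (cur :: qt) size).1.Sublist rem := by
      rw [hbfs]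
      exact ihs.trans (List.filter_sublist)
    refine ⟨hmem, hsub, ?_⟩
    have hlen : rem'.length = rem.length - ns.length :=
      pv_length_filter_not_mem rem ns hrem hnsnd hnssub
    have hle : ns.length ≤ rem.length :=
      ((hnsnd.subperm (fun _ h => hnssub _ h)).length_le)
    have hfle : (pvBFS adj rem' (qt ++ ns) (size + 1)).1.length ≤ rem'.length :=
      ihs.length_le
    rw [hbfs, ihsz]
    simp only [List.length_append, List.length_cons]
    push_cast
    omega

lemma pvSat_char (adj : PySem.Dict String (List String))
    (_hvals : ∀ y, (adj.getD y []).Nodup) :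
    ∀ (rem f comp : List String), rem.Nodup → (∀ x ∈ f, x ∉ rem) →
      comp.Nodup → (∀ x ∈ comp, x ∉ rem) →
      ((∀ x, x ∈ (pvSat adj rem f comp).1 ↔ x ∈ rem ∧ ¬ pvReach adj rem f x)
        ∧ (pvSat adj rem f comp).1.Sublist rem
        ∧ ((pvSat adj rem f comp).2.length : Int)
            = (comp.length : Int) + ((rem.length : Int) - ((pvSat adj rem f comp).1.length : Int))) := by
  refine pvSat.induct adj (motive := fun rem f comp => rem.Nodup → (∀ x ∈ f, x ∉ rem) →
      comp.Nodup → (∀ x ∈ comp, x ∉ rem) →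
      ((∀ x, x ∈ (pvSat adj rem f comp).1 ↔ x ∈ rem ∧ ¬ pvReach adj rem f x)
        ∧ (pvSat adj rem f comp).1.Sublist rem
        ∧ ((pvSat adj rem f comp).2.length : Int)
            = (comp.length : Int) + ((rem.length : Int) - ((pvSat adj rem f comp).1.length : Int))))
    ?_ ?_
  · intro rem f comp nf hemp hrem hf _ _
    have hemp2 : (pvFrontier adj f rem).isEmpty = true := hemp
    have hsat : pvSat adj rem f comp = (rem, comp) := by rw [pvSat]; simp [hemp2]
    rw [hsat]
    have hnil : pvFrontier adj f rem = [] := List.isEmpty_iff.mp hemp2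
    have h0 : ∀ y, ¬((∃ z ∈ f, y ∈ adj.getD z []) ∧ y ∈ rem) := by
      intro y hy
      have : y ∈ pvFrontier adj f rem := by
        unfold pvFrontier
        refine (PySem.Set.mem_inter _ _ _).mpr ⟨?_, hy.2⟩
        rw [PySem.Set.mem_ofList]
        obtain ⟨z, hz, hadj⟩ := hy.1
        exact List.mem_flatMap.mpr ⟨z, hz, hadj⟩
      rw [hnil] at this
      simp at this
    refine ⟨?_, List.Sublist.refl rem, by simp⟩
    intro x
    simp only [iff_self_and]
    intro hx hr
    exact hf x (pvReach_stuck adj rem f h0 x hr) hx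
  · intro rem f comp nf hemp ih hrem hf hcomp hcd
    have hemp2 : ¬ (pvFrontier adj f rem).isEmpty = true := hemp
    have hsat : pvSat adj rem f comp
        = pvSat adj (PySem.Set.diff rem nf) nf (PySem.Set.union comp nf) := by
      have hnfeq : nf = pvFrontier adj f rem := rfl
      rw [pvSat]; simp [hemp2, hnfeq]
    have hnsmem : ∀ y, y ∈ nf ↔ (∃ z ∈ f, y ∈ adj.getD z []) ∧ y ∈ rem := by
      intro y
      show y ∈ pvFrontier adj f rem ↔ _
      unfold pvFrontier
      rw [PySem.Set.mem_inter, PySem.Set.mem_ofList, List.mem_flatMap]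
    have hrem'mem : ∀ y, y ∈ PySem.Set.diff rem nf ↔ y ∈ rem ∧ y ∉ nf :=
      fun y => PySem.Set.mem_diff _ _ _
    have hnfsub : ∀ x ∈ nf, x ∈ rem := fun x hx => ((hnsmem x).mp hx).2
    have hnfnd : nf.Nodup := PySem.Set.nodup_inter _ _ (PySem.Set.nodup_ofList _)
    have hrem' : (PySem.Set.diff rem nf).Nodup := PySem.Set.nodup_diff _ _ hrem
    have hdisj : ∀ x ∈ nf, x ∉ PySem.Set.diff rem nf :=
      fun x hx hx' => ((hrem'mem x).mp hx').2 hx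
    have hcompnf : ∀ x ∈ nf, x ∉ comp := fun x hx hc => hcd x hc (hnfsub x hx)
    have hunion : PySem.Set.union comp nf = comp ++ nf := by
      show PySem.Set.update comp nf = comp ++ nf
      exact PySem.Set.update_eq_append_of_disjoint comp nf hnfnd hcompnf
    have hcomp' : (PySem.Set.union comp nf).Nodup := by
      rw [hunion]
      exact List.Nodup.append hcomp hnfnd (fun x hx hx' => hcompnf x hx' hx)
    have hcd' : ∀ x ∈ PySem.Set.union comp nf, x ∉ PySem.Set.diff rem nf := by
      intro x hx hx'
      rw [hunion] at hx
      rcases List.mem_append.mp hx with h | h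
      · exact hcd x h ((hrem'mem x).mp hx').1
      · exact hdisj x h hx'
    obtain ⟨ihm, ihs, ihsz⟩ := ih hrem' hdisj hcomp' hcd'
    have hshift := pvReach_shiftB adj rem f nf (PySem.Set.diff rem nf) hf hnsmem hrem'mem
    have hmem : ∀ x, x ∈ (pvSat adj rem f comp).1 ↔ x ∈ rem ∧ ¬ pvReach adj rem f x := by
      intro x
      rw [hsat]
      constructor
      · intro hx
        obtain ⟨hx1, hx2⟩ := (ihm x).mp hx
        have hxrem : x ∈ rem := ((hrem'mem x).mp hx1).1
        refine ⟨hxrem, ?_⟩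
        intro hr
        rcases (hshift x hxrem).mp hr with h | h
        · exact ((hrem'mem x).mp hx1).2 h
        · exact hx2 h
      · rintro ⟨hxrem, hnr⟩
        have hxns : x ∉ nf := fun h => hnr ((hshift x hxrem).mpr (Or.inl h))
        refine (ihm x).mpr ⟨(hrem'mem x).mpr ⟨hxrem, hxns⟩, ?_⟩
        intro h
        exact hnr ((hshift x hxrem).mpr (Or.inr h))
    have hdiffsub : (PySem.Set.diff rem nf).Sublist rem := by
      show (rem.filter (fun x => !(nf.contains x))).Sublist rem
      exact List.filter_sublist
    have hsub : (pvSat adj rem f comp).1.Sublist rem := by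
      rw [hsat]
      exact ihs.trans hdiffsub
    refine ⟨hmem, hsub, ?_⟩
    have hlen : (PySem.Set.diff rem nf).length = rem.length - nf.length :=
      pv_length_filter_not_mem rem nf hrem hnfnd hnfsub
    have hle : nf.length ≤ rem.length :=
      ((hnfnd.subperm (fun _ h => hnfsub _ h)).length_le)
    have hfle : (pvSat adj (PySem.Set.diff rem nf) nf (PySem.Set.union comp nf)).1.length
        ≤ (PySem.Set.diff rem nf).length := ihs.length_le
    rw [hsat, ihsz, hunion]
    simp only [List.length_append]
    push_cast
    omega

-- the two phase results agree
lemma pv_phase_eq (adjA adjB : PySem.Dict String (List String))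
    (hEq : ∀ y, adjA.getD y [] = adjB.getD y []) (hvals : ∀ y, (adjB.getD y []).Nodup)
    (rem : List String) (hrem : rem.Nodup) (start : String) (_hs : start ∈ rem) :
    (pvBFS adjA (rem.erase start) [start] 0).1
        = (pvSat adjB (PySem.Set.discard rem start) [start] [start]).1
      ∧ (pvBFS adjA (rem.erase start) [start] 0).2
        = ((pvSat adjB (PySem.Set.discard rem start) [start] [start]).2.length : Int)
      ∧ (pvBFS adjA (rem.erase start) [start] 0).1.Sublist rem
      ∧ 1 ≤ (pvBFS adjA (rem.erase start) [start] 0).2 := by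
  have hvalsA : ∀ y, (adjA.getD y []).Nodup := fun y => by rw [hEq y]; exact hvals y
  have hr1eq : PySem.Set.discard rem start = rem.erase start := by
    rw [hrem.erase_eq_filter start]
    rfl
  rw [hr1eq]
  have hrem1 : (rem.erase start).Nodup := hrem.erase start
  have hstart : start ∉ rem.erase start := by
    rw [hrem.erase_eq_filter start]; simp
  have hq : ∀ x ∈ [start], x ∉ rem.erase start := by simpa using hstart
  obtain ⟨am, as, asz⟩ := pvBFS_char adjA hvalsA (rem.erase start) [start] 0 hrem1 hq
  obtain ⟨bm, bs, bsz⟩ := pvSat_char adjB hvals (rem.erase start) [start] [start] hrem1 hq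
    (List.nodup_singleton _) hq
  have hmemiff : ∀ x, x ∈ (pvBFS adjA (rem.erase start) [start] 0).1
      ↔ x ∈ (pvSat adjB (rem.erase start) [start] [start]).1 := by
    intro x
    rw [am x, bm x]
    constructor
    · rintro ⟨h1, h2⟩; exact ⟨h1, fun h => h2 ((pvReach_congr hEq).mpr h)⟩
    · rintro ⟨h1, h2⟩; exact ⟨h1, fun h => h2 ((pvReach_congr hEq).mp h)⟩
  have h1 : (pvBFS adjA (rem.erase start) [start] 0).1
      = (pvSat adjB (rem.erase start) [start] [start]).1 :=
    pv_sublist_eq_of_mem_iff as bs hrem1 hmemiff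
  have hfle : (pvBFS adjA (rem.erase start) [start] 0).1.length ≤ (rem.erase start).length :=
    as.length_le
  refine ⟨h1, ?_, as.trans (List.erase_sublist), ?_⟩
  · rw [asz, bsz, h1]
    simp
  · rw [asz]
    simp only [List.length_cons, List.length_nil]
    push_cast
    omega

lemma pv_outer (adjA adjB : PySem.Dict String (List String))
    (hEq : ∀ y, adjA.getD y [] = adjB.getD y []) (hvals : ∀ y, (adjB.getD y []).Nodup) :
    ∀ (ns rem : List String) (sizes : List Int) (count largest : Int), rem.Nodup →
      count = (sizes.length : Int) → largest = sizes.foldl max 0 → (∀ s ∈ sizes, 1 ≤ s) →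
      ((ns.foldl (fun (st : List String × Int × Int) start =>
          if st.1.contains start then
            let r := pvSat adjB (PySem.Set.discard st.1 start) [start] [start]
            (r.1, st.2.1 + 1, max st.2.2 (r.2.length : Int))
          else st) (rem, count, largest)).1
        = (ns.foldl (fun (st : List String × List Int) start =>
          if st.1.contains start then
            let r := pvBFS adjA (st.1.erase start) [start] 0
            (r.1, st.2 ++ [r.2])
          else st) (rem, sizes)).1
      ∧ (ns.foldl (fun (st : List String × Int × Int) start =>
          if st.1.contains start then
            let r := pvSat adjB (PySem.Set.discard st.1 start) [start] [start]
            (r.1, st.2.1 + 1, max st.2.2 (r.2.length : Int))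
          else st) (rem, count, largest)).2.1
        = (((ns.foldl (fun (st : List String × List Int) start =>
          if st.1.contains start then
            let r := pvBFS adjA (st.1.erase start) [start] 0
            (r.1, st.2 ++ [r.2])
          else st) (rem, sizes)).2.length : Int))
      ∧ (ns.foldl (fun (st : List String × Int × Int) start =>
          if st.1.contains start then
            let r := pvSat adjB (PySem.Set.discard st.1 start) [start] [start]
            (r.1, st.2.1 + 1, max st.2.2 (r.2.length : Int))
          else st) (rem, count, largest)).2.2
        = (ns.foldl (fun (st : List String × List Int) start =>
          if st.1.contains start then
            let r := pvBFS adjA (st.1.erase start) [start] 0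
            (r.1, st.2 ++ [r.2])
          else st) (rem, sizes)).2.foldl max 0
      ∧ (∀ s ∈ (ns.foldl (fun (st : List String × List Int) start =>
          if st.1.contains start then
            let r := pvBFS adjA (st.1.erase start) [start] 0
            (r.1, st.2 ++ [r.2])
          else st) (rem, sizes)).2, 1 ≤ s)) := by
  intro ns
  induction ns with
  | nil =>
      intro rem sizes count largest _ hc hl hge
      exact ⟨rfl, by simpa using hc, by simpa using hl, by simpa using hge⟩
  | cons start t ih =>
      intro rem sizes count largest hrem hc hl hge
      rw [List.foldl_cons, List.foldl_cons]
      by_cases hmem : start ∈ rem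
      · have hcont : rem.contains start = true := by simpa using hmem
        simp only [hcont, if_true]
        obtain ⟨p1, p2, p3, p4⟩ := pv_phase_eq adjA adjB hEq hvals rem hrem start hmem
        rw [← p1, ← p2]
        refine ih (pvBFS adjA (rem.erase start) [start] 0).1
          (sizes ++ [(pvBFS adjA (rem.erase start) [start] 0).2])
          (count + 1) (max largest (pvBFS adjA (rem.erase start) [start] 0).2)
          (p3.nodup hrem) ?_ ?_ ?_
        · rw [hc]; simp
        · rw [hl, List.foldl_append]; simp
        · intro s hsm
          rcases List.mem_append.mp hsm with h | h
          · exact hge s h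
          · simp only [List.mem_singleton] at h
            exact h ▸ p4
      · have hcont : ¬ rem.contains start = true := by simpa using hmem
        simp only [hcont, if_false, Bool.false_eq_true]
        exact ih rem sizes count largest hrem hc hl hge

-- adjacency building: pointwise lookups agree between A's build (pre-seeded keys) and B's
lemma pv_init_getD (ns : List String) : ∀ (d : PySem.Dict String (List String)),
    (∀ y, d.getD y [] = []) → ∀ y,
    (ns.foldl (fun d n => d.insert n ([] : List String)) d).getD y [] = [] := by
  induction ns with
  | nil => intro d h y; exact h y
  | cons n t ih =>
      intro d h y
      rw [List.foldl_cons]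
      refine ih _ ?_ y
      intro z
      rw [PySem.Dict.getD_insert]
      split_ifs
      · rfl
      · exact h z

lemma pv_addEdge_getD_congr (d1 d2 : PySem.Dict String (List String)) (a b : String)
    (h : ∀ y, d1.getD y [] = d2.getD y []) :
    ∀ y, (pvAddEdge d1 a b).getD y [] = (pvAddEdge d2 a b).getD y [] := by
  intro y
  simp only [pvAddEdge, PySem.Dict.getD_insert, h]

lemma pv_addEdge_getD_nodup (d : PySem.Dict String (List String)) (a b : String)
    (h : ∀ y, (d.getD y []).Nodup) :
    ∀ y, ((pvAddEdge d a b).getD y []).Nodup := by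
  intro y
  simp only [pvAddEdge, PySem.Dict.getD_insert]
  split_ifs
  all_goals repeat' apply PySem.Set.nodup_add
  all_goals exact h _

lemma pv_adj_getD_congr (rows : List (List (String × String))) :
    ∀ (d1 d2 : PySem.Dict String (List String)), (∀ y, d1.getD y [] = d2.getD y []) →
    ∀ y, (rows.foldl (fun d r => pvAddEdge d (pvGetKey r "source") (pvGetKey r "target")) d1).getD y []
      = (rows.foldl (fun d r => pvAddEdge d (pvGetKey r "source") (pvGetKey r "target")) d2).getD y [] := by
  induction rows with
  | nil => intro d1 d2 h y; exact h y
  | cons r t ih =>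
      intro d1 d2 h y
      rw [List.foldl_cons, List.foldl_cons]
      exact ih _ _ (pv_addEdge_getD_congr _ _ _ _ h) y

lemma pv_adj_getD_nodup (rows : List (List (String × String))) :
    ∀ (d : PySem.Dict String (List String)), (∀ y, (d.getD y []).Nodup) →
    ∀ y, ((rows.foldl (fun d r => pvAddEdge d (pvGetKey r "source") (pvGetKey r "target")) d).getD y []).Nodup := by
  induction rows with
  | nil => intro d h y; exact h y
  | cons r t ih =>
      intro d h y
      rw [List.foldl_cons]
      exact ih _ (pv_addEdge_getD_nodup _ _ _ h) y

lemma pv_addEdge_mem_keys (d : PySem.Dict String (List String)) (a b y : String) :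
    y ∈ (pvAddEdge d a b).keys ↔ y = a ∨ y = b ∨ y ∈ d.keys := by
  simp only [pvAddEdge, PySem.Dict.mem_keys_insert]
  tauto

lemma pv_adj_mem_keys (rows : List (List (String × String))) :
    ∀ (d : PySem.Dict String (List String)) (y : String),
    y ∈ (rows.foldl (fun d r => pvAddEdge d (pvGetKey r "source") (pvGetKey r "target")) d).keys
      ↔ y ∈ d.keys ∨ ∃ r ∈ rows, y = pvGetKey r "source" ∨ y = pvGetKey r "target" := by
  induction rows with
  | nil => intro d y; simp
  | cons r t ih =>
      intro d y
      rw [List.foldl_cons, ih, pv_addEdge_mem_keys]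
      simp only [List.mem_cons]
      constructor
      · rintro ((h | h | h) | ⟨r', hr', h⟩)
        · exact Or.inr ⟨r, Or.inl rfl, Or.inl h⟩
        · exact Or.inr ⟨r, Or.inl rfl, Or.inr h⟩
        · exact Or.inl h
        · exact Or.inr ⟨r', Or.inr hr', h⟩
      · rintro (h | ⟨r', hr' | hr', h⟩)
        · exact Or.inl (Or.inr (Or.inr h))
        · subst hr'
          rcases h with h | h
          · exact Or.inl (Or.inl h)
          · exact Or.inl (Or.inr (Or.inl h))
        · exact Or.inr ⟨r', hr', h⟩

lemma pv_adj_keys_nodup (rows : List (List (String × String))) :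
    ∀ (d : PySem.Dict String (List String)), d.keys.Nodup →
    (rows.foldl (fun d r => pvAddEdge d (pvGetKey r "source") (pvGetKey r "target")) d).keys.Nodup := by
  induction rows with
  | nil => intro d h; exact h
  | cons r t ih =>
      intro d h
      rw [List.foldl_cons]
      refine ih _ ?_
      show ((PySem.Dict.insert _ _ _).insert _ _).keys.Nodup
      exact PySem.Dict.nodup_keys_insert _ _ _ (PySem.Dict.nodup_keys_insert _ _ _ h)

-- the sorted node lists of A and B coincide
lemma pv_nodes_eq (rows : List (List (String × String))) :
    PySem.List.sorted
        (PySem.Set.union (PySem.Set.ofList (rows.map (fun r => pvGetKey r "source")))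
          (PySem.Set.ofList (rows.map (fun r => pvGetKey r "target")))) (fun x => x) false
      = PySem.List.sorted
          ((rows.foldl (fun d r => pvAddEdge d (pvGetKey r "source") (pvGetKey r "target"))
            PySem.Dict.empty).keys) (fun x => x) false := by
  apply PySem.List.sorted_eq_sorted_of_perm _ _ _ (fun a b h => h)
  refine (List.perm_ext_iff_of_nodup ?_ ?_).mpr ?_
  · exact PySem.Set.nodup_union _ _ (PySem.Set.nodup_ofList _)
  · exact pv_adj_keys_nodup rows PySem.Dict.empty (by rw [PySem.Dict.keys_empty]; exact List.nodup_nil)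
  · intro a
    rw [PySem.Set.mem_union, PySem.Set.mem_ofList, PySem.Set.mem_ofList,
      pv_adj_mem_keys rows PySem.Dict.empty a, PySem.Dict.keys_empty]
    simp only [List.mem_map, List.not_mem_nil, false_or]
    constructor
    · rintro (⟨r, hr, h⟩ | ⟨r, hr, h⟩)
      · exact ⟨r, hr, Or.inl h.symm⟩
      · exact ⟨r, hr, Or.inr h.symm⟩
    · rintro ⟨r, hr, h | h⟩
      · exact Or.inl ⟨r, hr, h.symm⟩
      · exact Or.inr ⟨r, hr, h.symm⟩

lemma pv_main (rows : List (List (String × String))) :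
    graph_components rows = graph_components_alt rows := by
  simp only [graph_components, graph_components_alt]
  rw [← pv_nodes_eq rows]
  set nodes := PySem.List.sorted
      (PySem.Set.union (PySem.Set.ofList (rows.map (fun r => pvGetKey r "source")))
        (PySem.Set.ofList (rows.map (fun r => pvGetKey r "target")))) (fun x => x) false
    with hnodes
  by_cases hnil : nodes = []
  · rw [if_pos hnil, hnil]
    simp
  · rw [if_neg hnil]
    have hEqAdj : ∀ y,
        (rows.foldl (fun d r => pvAddEdge d (pvGetKey r "source") (pvGetKey r "target"))
          (nodes.foldl (fun d n => d.insert n ([] : List String)) PySem.Dict.empty)).getD y []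
        = (rows.foldl (fun d r => pvAddEdge d (pvGetKey r "source") (pvGetKey r "target"))
          PySem.Dict.empty).getD y [] := by
      refine pv_adj_getD_congr rows _ _ ?_
      intro y
      rw [pv_init_getD nodes _ (fun z => PySem.Dict.getD_empty _ _) y, PySem.Dict.getD_empty]
    have hvalsB : ∀ y,
        ((rows.foldl (fun d r => pvAddEdge d (pvGetKey r "source") (pvGetKey r "target"))
          PySem.Dict.empty).getD y []).Nodup := by
      refine pv_adj_getD_nodup rows _ ?_
      intro y
      rw [PySem.Dict.getD_empty]
      exact List.nodup_nil
    have hnodesnd : nodes.Nodup :=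
      (PySem.List.sorted_perm _ _ _).symm.nodup
        (PySem.Set.nodup_union _ _ (PySem.Set.nodup_ofList _))
    obtain ⟨o1, o2, o3, o4⟩ := pv_outer _ _ hEqAdj hvalsB nodes nodes [] 0 0 hnodesnd
      (by simp) (by simp) (by simp)
    simp only [Prod.mk.injEq]
    refine ⟨by trivial, o2.symm, ?_⟩
    rw [o3]
    rcases hfa : (nodes.foldl (fun (st : List String × List Int) start =>
        if st.1.contains start then
          let r := pvBFS (rows.foldl (fun d r => pvAddEdge d (pvGetKey r "source") (pvGetKey r "target"))
            (nodes.foldl (fun d n => d.insert n ([] : List String)) PySem.Dict.empty))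
            (st.1.erase start) [start] 0
          (r.1, st.2 ++ [r.2])
        else st) (nodes, ([] : List Int))).2 with _ | ⟨s0, st⟩
    · simp [PySem.List.max?]
    · rw [PySem.List.max?_id_cons]
      have h1 : (1 : Int) ≤ s0 := o4 s0 (by rw [hfa]; exact List.mem_cons_self)
      rw [List.foldl_cons]
      have hm : max (0 : Int) s0 = s0 := max_eq_right (by omega)
      rw [hm]

-- ===== VERDICT (by name: the statement is the Claim_ definition above) =====
theorem graph_components_spec : Claim_equal_graph_components := by
  intro rows _ _
  show graph_components rows = graph_components_alt rows
  exact pv_main rows
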